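-- pv_equiv track=rewrite | github.com/RTrentJones/BAMCP | src/bamcp/core/reference.py | normalize_build_name
-- ===== SOURCE A (Python) =====
-- GENOME_BUILDS: dict[str, dict] = {
--     "GRCh38": {
--         "aliases": ["hg38", "grch38", "grch38.p14", "grch38.p13"],
--         "chr1_length": 248956422,
--         "description": "Human genome build 38 (Dec 2013)",
--         "fasta_url": "https://hgdownload.soe.ucsc.edu/goldenPath/hg38/bigZips/hg38.fa.gz",
--     },
--     "GRCh37": {
--         "aliases": ["hg19", "grch37", "b37", "hs37d5"],
--         "chr1_length": 249250621,
--         "description": "Human genome build 37 (Feb 2009)",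
--         "fasta_url": "https://hgdownload.soe.ucsc.edu/goldenPath/hg19/bigZips/hg19.fa.gz",
--     },
-- }
--
-- def normalize_build_name(name: str) -> str | None:
--     """Normalize build aliases to canonical names.
--
--     Args:
--         name: Build name or alias (e.g., "hg38", "GRCh38", "hg19")
--
--     Returns:
--         Canonical build name (e.g., "GRCh38") or None if not recognized.
--
--     Examples:
--         >>> normalize_build_name("hg38")
--         "GRCh38"
--         >>> normalize_build_name("hg19")
--         "GRCh37"
--         >>> normalize_build_name("unknown")
--         None
--     """
--     name_lower = name.lower()
--
--     for canonical, info in GENOME_BUILDS.items():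
--         if name_lower == canonical.lower():
--             return canonical
--         if name_lower in info["aliases"]:
--             return canonical
--
--     return None
-- ===== SOURCE B (Python) =====
-- # B: one flat inverted index (alias/lowered-canonical -> canonical) built once; lookup is a single dict.get.
-- _ALIAS_TO_CANONICAL = {
--     "grch38": "GRCh38",
--     "hg38": "GRCh38",
--     "grch38.p14": "GRCh38",
--     "grch38.p13": "GRCh38",
--     "grch37": "GRCh37",
--     "hg19": "GRCh37",
--     "b37": "GRCh37",
--     "hs37d5": "GRCh37",
-- }
--
-- def normalize_build_name(name: str) -> str | None:
--     return _ALIAS_TO_CANONICAL.get(name.lower())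
-- ===== Notes on version B (the rewrite author's own statement) =====
-- stated objective: simpler
-- what changed: Replaced the per-build loop with its canonical-lowercase comparison and alias-list membership scan by a single precomputed inverted index (alias/lowered-canonical -> canonical) queried with one dict.get.
import Mathlib
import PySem

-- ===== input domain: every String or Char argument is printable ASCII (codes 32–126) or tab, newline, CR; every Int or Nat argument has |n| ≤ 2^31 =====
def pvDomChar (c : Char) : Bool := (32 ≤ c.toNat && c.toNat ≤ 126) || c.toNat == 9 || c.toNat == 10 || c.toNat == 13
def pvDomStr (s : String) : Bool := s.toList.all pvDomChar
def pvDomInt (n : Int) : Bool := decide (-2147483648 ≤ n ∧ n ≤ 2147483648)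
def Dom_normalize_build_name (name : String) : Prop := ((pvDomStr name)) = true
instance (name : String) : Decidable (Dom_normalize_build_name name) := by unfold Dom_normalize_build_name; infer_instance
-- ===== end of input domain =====

-- B replaces A's per-build loop (canonical-lowercase equality + alias-list membership) by one
-- precomputed inverted index queried with a single lookup; objective: simpler.

-- ===== PORT A =====
-- GENOME_BUILDS, reduced to the fields the function reads (canonical name, aliases)
def gbBuilds : List (String × List String) :=
  [("GRCh38", ["hg38", "grch38", "grch38.p14", "grch38.p13"]),
   ("GRCh37", ["hg19", "grch37", "b37", "hs37d5"])]

-- the for-loop over GENOME_BUILDS.items()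
def gbLoop (nl : String) : List (String × List String) → Option String
  | [] => none
  | (canonical, aliases) :: rest =>
    if nl = PySem.Str.lower canonical then some canonical
    else if aliases.contains nl then some canonical
    else gbLoop nl rest

def normalize_build_name (name : String) : Option String :=
  gbLoop (PySem.Str.lower name) gbBuilds

-- ===== PORT B =====
-- the module-level flat dict _ALIAS_TO_CANONICAL
def gbAliasToCanonical : PySem.Dict String String :=
  PySem.Dict.ofList
    [("grch38", "GRCh38"), ("hg38", "GRCh38"), ("grch38.p14", "GRCh38"), ("grch38.p13", "GRCh38"),
     ("grch37", "GRCh37"), ("hg19", "GRCh37"), ("b37", "GRCh37"), ("hs37d5", "GRCh37")]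

def normalize_build_name_alt (name : String) : Option String :=
  gbAliasToCanonical.get? (PySem.Str.lower name)

-- ===== PRECONDITION & SPEC =====
def Spec_normalize_build_name (name : String) (out : Option String) : Prop := out = normalize_build_name_alt name
instance (name : String) (out : Option String) : Decidable (Spec_normalize_build_name name out) := by unfold Spec_normalize_build_name; infer_instance

-- ===== CLAIM (what is proved, stated in full; the proofs are below) =====
def Claim_equal_normalize_build_name : Prop := ∀ (name : String), Dom_normalize_build_name name → Spec_normalize_build_name name (normalize_build_name name)

-- ===== LEMMAS AND PROOFS =====
-- Both sides depend on the input only through its lowercased form; case split on the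
-- (finitely many) keys either side compares against.
theorem gb_agree (nl : String) : gbLoop nl gbBuilds = gbAliasToCanonical.get? nl := by
  by_cases h1 : nl = "grch38"
  · subst h1; decide
  by_cases h2 : nl = "hg38"
  · subst h2; decide
  by_cases h3 : nl = "grch38.p14"
  · subst h3; decide
  by_cases h4 : nl = "grch38.p13"
  · subst h4; decide
  by_cases h5 : nl = "grch37"
  · subst h5; decide
  by_cases h6 : nl = "hg19"
  · subst h6; decide
  by_cases h7 : nl = "b37"
  · subst h7; decide
  by_cases h8 : nl = "hs37d5"
  · subst h8; decide
  have e38 : PySem.Str.lower "GRCh38" = "grch38" := by decide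
  have e37 : PySem.Str.lower "GRCh37" = "grch37" := by decide
  have hd : gbAliasToCanonical.get? nl = none := by
    simp [gbAliasToCanonical, PySem.Dict.ofList, PySem.Dict.get?, PySem.Dict.empty,
      PySem.Dict.update, PySem.Dict.insert]
    simp_all [eq_comm]
  simp [gbLoop, gbBuilds, hd, e38, e37, h1, h2, h3, h4, h5, h6, h7, h8]

-- ===== VERDICT (by name: the statement is the Claim_ definition above) =====
theorem normalize_build_name_spec : Claim_equal_normalize_build_name := by
  intro name _
  unfold Spec_normalize_build_name normalize_build_name normalize_build_name_alt
  exact gb_agree _
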